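-- pv_equiv track=rewrite | github.com/arendvosmaer/advent_of_code | 2025/aoc_4.py | neighbour_roll_count
-- ===== SOURCE A (Python) =====
-- def neighbour_roll_count(d, x, y, distance=1) -> int:
--     max_y = len(d) - 1
--     max_x = len(d[0]) - 1
--     cnt = 0
--     for ny in range(y - distance, y + distance + 1):
--         if ny < 0 or ny > max_y:
--             continue
--         for nx in range(x - distance, x + distance + 1):
--             if nx < 0 or nx > max_x:
--                 continue
--             if nx == x and ny == y:
--                 continue
--             if d[ny][nx]:
--                 cnt += 1
--     return cnt
-- ===== SOURCE B (Python) =====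
-- def _row_prefix(row, w):
--     p = [0]
--     s = 0
--     for j in range(w):
--         s += 1 if row[j] else 0
--         p.append(s)
--     return p
--
--
-- def neighbour_roll_count(d, x, y, distance=1) -> int:
--     w = len(d[0])
--     prefs = [_row_prefix(row, w) for row in d]
--     y0, y1 = max(0, y - distance), min(len(d) - 1, y + distance)
--     x0, x1 = max(0, x - distance), min(w - 1, x + distance)
--     if y0 > y1 or x0 > x1:
--         return 0
--     total = sum(prefs[ny][x1 + 1] - prefs[ny][x0] for ny in range(y0, y1 + 1))
--     if y0 <= y <= y1 and x0 <= x <= x1 and d[y][x]: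
--         total -= 1
--     return total
-- ===== Notes on version B (the rewrite author's own statement) =====
-- stated objective: alternative
-- what changed: B precomputes a per-row prefix-sum table of truthy counts and answers the window by one prefix difference per row (plus a centre-cell subtraction), replacing A's per-cell inner scan with bounds and centre tests; the table makes repeated or wide queries cheap, though a single call still pays for building it.
-- outside the precondition, e.g. on neighbour_roll_count([[1, 2], [3]], 0, 0, 0): A returns 0, B raises IndexError
import Mathlib
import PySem

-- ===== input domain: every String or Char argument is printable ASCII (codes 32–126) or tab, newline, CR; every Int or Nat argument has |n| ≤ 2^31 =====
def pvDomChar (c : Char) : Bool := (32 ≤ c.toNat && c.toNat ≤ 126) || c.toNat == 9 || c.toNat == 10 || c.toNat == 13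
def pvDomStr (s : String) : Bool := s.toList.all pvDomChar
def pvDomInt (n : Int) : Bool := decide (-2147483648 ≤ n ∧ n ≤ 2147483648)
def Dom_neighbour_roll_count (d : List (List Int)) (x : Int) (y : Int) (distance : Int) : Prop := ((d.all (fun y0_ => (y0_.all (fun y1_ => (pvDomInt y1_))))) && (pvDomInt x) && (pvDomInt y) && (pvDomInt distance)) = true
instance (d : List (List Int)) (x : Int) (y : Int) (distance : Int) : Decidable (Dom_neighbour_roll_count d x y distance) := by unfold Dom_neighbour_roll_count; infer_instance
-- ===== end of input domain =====

-- B precomputes a per-row prefix-sum table of truthy counts and answers the window with one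
-- prefix difference per row plus a centre-cell subtraction, replacing A's per-cell window scan.


-- ===== PORT A =====
def neighbour_roll_count (d : List (List Int)) (x : Int) (y : Int) (distance : Int) : Int :=
  let max_y : Int := (d.length : Int) - 1
  let max_x : Int := ((PySem.List.pyGetD d 0 ([] : List Int)).length : Int) - 1
  (PySem.List.pyRange (y - distance) (y + distance + 1) 1).foldl (fun cnt ny =>
    if ny < 0 ∨ ny > max_y then cnt
    else (PySem.List.pyRange (x - distance) (x + distance + 1) 1).foldl (fun cnt nx =>
      if nx < 0 ∨ nx > max_x then cnt
      else if nx = x ∧ ny = y then cnt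
      else if PySem.List.pyGetD (PySem.List.pyGetD d ny ([] : List Int)) nx 0 ≠ 0 then cnt + 1
      else cnt) cnt) 0

-- ===== PORT B =====
-- helper _row_prefix of Source B: prefix counts of truthy cells in row[0:w]
def pvRowPrefix (row : List Int) (w : Int) : List Int :=
  ((PySem.List.pyRange 0 w 1).foldl (fun (ps : List Int × Int) j =>
      (ps.1 ++ [ps.2 + (if PySem.List.pyGetD row j 0 ≠ 0 then 1 else 0)],
       ps.2 + (if PySem.List.pyGetD row j 0 ≠ 0 then 1 else 0))) ([0], 0)).1

def neighbour_roll_count_alt (d : List (List Int)) (x : Int) (y : Int) (distance : Int) : Int :=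
  let w : Int := ((PySem.List.pyGetD d 0 ([] : List Int)).length : Int)
  let prefs : List (List Int) := d.map (fun row => pvRowPrefix row w)
  let y0 : Int := max 0 (y - distance)
  let y1 : Int := min ((d.length : Int) - 1) (y + distance)
  let x0 : Int := max 0 (x - distance)
  let x1 : Int := min (w - 1) (x + distance)
  if y0 > y1 ∨ x0 > x1 then 0
  else
    let total : Int := ((PySem.List.pyRange y0 (y1 + 1) 1).map (fun ny =>
        PySem.List.pyGetD (PySem.List.pyGetD prefs ny ([] : List Int)) (x1 + 1) 0
        - PySem.List.pyGetD (PySem.List.pyGetD prefs ny ([] : List Int)) x0 0)).sum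
    if y0 ≤ y ∧ y ≤ y1 ∧ x0 ≤ x ∧ x ≤ x1 ∧
       PySem.List.pyGetD (PySem.List.pyGetD d y ([] : List Int)) x 0 ≠ 0
    then total - 1 else total

-- ===== PRECONDITION & SPEC =====
-- Pre_ excludes the empty grid (A raises IndexError on len(d[0])) and ragged grids with a row
-- shorter than row 0: B's prefix build indexes every row up to len(d[0]) and raises IndexError
-- there, while A also raises on such grids whenever its window reaches a missing non-centre cell.
def Pre_neighbour_roll_count (d : List (List Int)) (x : Int) (y : Int) (distance : Int) : Prop :=
  d ≠ [] ∧ ∀ row ∈ d, (PySem.List.pyGetD d 0 ([] : List Int)).length ≤ row.length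
instance (d : List (List Int)) (x : Int) (y : Int) (distance : Int) : Decidable (Pre_neighbour_roll_count d x y distance) := by unfold Pre_neighbour_roll_count; infer_instance

def pvWitness_neighbour_roll_count : List (List Int) × Int × Int × Int := ([[1, 0], [0, 1]], 0, 0, 1)

def Spec_neighbour_roll_count (d : List (List Int)) (x : Int) (y : Int) (distance : Int) (out : Int) : Prop := out = neighbour_roll_count_alt d x y distance
instance (d : List (List Int)) (x : Int) (y : Int) (distance : Int) (out : Int) : Decidable (Spec_neighbour_roll_count d x y distance out) := by unfold Spec_neighbour_roll_count; infer_instance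

-- ===== CLAIM (what is proved, stated in full; the proofs are below) =====
def Claim_equal_neighbour_roll_count : Prop := ∀ (d : List (List Int)) (x : Int) (y : Int) (distance : Int), Dom_neighbour_roll_count d x y distance → Pre_neighbour_roll_count d x y distance → Spec_neighbour_roll_count d x y distance (neighbour_roll_count d x y distance)

-- ===== LEMMAS AND PROOFS =====

-- the 0/1 indicator of a truthy cell of a row
def pvIndR (row : List Int) (i : Int) : Int :=
  if PySem.List.pyGetD row i 0 ≠ 0 then 1 else 0

-- count of truthy cells among row[0:j]
def pvCnt (row : List Int) (j : Int) : Int :=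
  ((PySem.List.pyRange 0 j 1).map (pvIndR row)).sum

-- the 0/1 indicator of a truthy cell d[ny][nx]
def pvInd (d : List (List Int)) (ny nx : Int) : Int :=
  pvIndR (PySem.List.pyGetD d ny ([] : List Int)) nx

theorem pvCnt_succ (row : List Int) (a : Int) (h : 0 ≤ a) :
    pvCnt row (a + 1) = pvCnt row a + pvIndR row a := by
  unfold pvCnt
  rw [PySem.List.pyRange_one_succ_right h]
  simp

-- invariant of the prefix-building fold of _row_prefix
theorem pvFoldInv (row : List Int) (w a : Int) (h0 : 0 ≤ a) (hw : a ≤ w) :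
    (PySem.List.pyRange a w 1).foldl (fun (ps : List Int × Int) j =>
        (ps.1 ++ [ps.2 + (if PySem.List.pyGetD row j 0 ≠ 0 then 1 else 0)],
         ps.2 + (if PySem.List.pyGetD row j 0 ≠ 0 then 1 else 0)))
      ((PySem.List.pyRange 0 (a + 1) 1).map (pvCnt row), pvCnt row a)
    = ((PySem.List.pyRange 0 (w + 1) 1).map (pvCnt row), pvCnt row w) := by
  by_cases h : w ≤ a
  · have : a = w := le_antisymm hw h
    subst this
    rw [PySem.List.pyRange_one_eq_nil le_rfl]
    rfl
  · rw [PySem.List.pyRange_one_cons (by omega : a < w), List.foldl_cons]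
    have hstep : pvCnt row a + (if PySem.List.pyGetD row a 0 ≠ 0 then (1:Int) else 0)
        = pvCnt row (a + 1) := by
      rw [pvCnt_succ row a h0]; rfl
    have hlist : (PySem.List.pyRange 0 (a + 1) 1).map (pvCnt row) ++ [pvCnt row (a + 1)]
        = (PySem.List.pyRange 0 (a + 1 + 1) 1).map (pvCnt row) := by
      rw [PySem.List.pyRange_one_succ_right (by omega : (0:Int) ≤ a + 1), List.map_append]
      rfl
    simp only [hstep, hlist]
    exact pvFoldInv row w (a + 1) (by omega) (by omega)
termination_by (w - a).toNat
decreasing_by omega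

-- _row_prefix returns the list of prefix counts pvCnt row 0, …, pvCnt row w
theorem pvRowPrefix_eq (row : List Int) (w : Int) (h : 0 ≤ w) :
    pvRowPrefix row w = (PySem.List.pyRange 0 (w + 1) 1).map (pvCnt row) := by
  unfold pvRowPrefix
  have h0 : ((PySem.List.pyRange 0 (0 + 1) 1).map (pvCnt row), pvCnt row 0)
      = (([0], 0) : List Int × Int) := by
    rw [show (0:Int) + 1 = 0 + 1 by ring, PySem.List.pyRange_one_singleton]
    simp [pvCnt, PySem.List.pyRange_one_eq_nil le_rfl]
  rw [← h0, pvFoldInv row w 0 le_rfl h]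

-- prefix difference = count in the slice [a, b)
theorem pvPrefixQuery (row : List Int) (w a b : Int)
    (h0 : 0 ≤ a) (hab : a ≤ b) (hbw : b ≤ w) :
    PySem.List.pyGetD (pvRowPrefix row w) b 0 - PySem.List.pyGetD (pvRowPrefix row w) a 0
      = ((PySem.List.pyRange a b 1).map (pvIndR row)).sum := by
  rw [pvRowPrefix_eq row w (by omega)]
  rw [PySem.List.pyGetD_map_pyRange_of_nonneg (pvCnt row) (w + 1) b 0 (by omega) (by omega)]
  rw [PySem.List.pyGetD_map_pyRange_of_nonneg (pvCnt row) (w + 1) a 0 (by omega) (by omega)]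
  unfold pvCnt
  rw [PySem.List.pyRange_one_append 0 a b h0 hab, List.map_append, List.sum_append]
  ring

-- a Python accumulation loop whose body adds g i is init + the sum of g over the list
theorem pvFoldlBodySum (l : List Int) (f : Int → Int → Int) (g : Int → Int)
    (h : ∀ i ∈ l, ∀ c, f c i = c + g i) : ∀ a : Int, l.foldl f a = a + (l.map g).sum := by
  induction l with
  | nil => intro a; simp
  | cons i t ih =>
    intro a
    simp only [List.foldl_cons, List.map_cons, List.sum_cons]
    rw [h i (by simp) a, ih (fun j hj c => h j (by simp [hj]) c)]
    ring

-- summing a function that vanishes below m: the range can start at m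
theorem pvTrimLeft (b m : Int) (g : Int → Int) (hm : ∀ i, i < m → g i = 0) (a : Int) :
    ((PySem.List.pyRange a b 1).map g).sum = ((PySem.List.pyRange (max a m) b 1).map g).sum := by
  by_cases h : m ≤ a
  · rw [max_eq_left h]
  · by_cases hb : b ≤ a
    · rw [PySem.List.pyRange_one_eq_nil hb, PySem.List.pyRange_one_eq_nil (by omega : b ≤ max a m)]
    · rw [PySem.List.pyRange_one_cons (by omega : a < b)]
      have ih := pvTrimLeft b m g hm (a + 1)
      have hmax : max (a + 1) m = max a m := by omega
      simp only [List.map_cons, List.sum_cons, hm a (by omega), zero_add]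
      rw [ih, hmax]
termination_by (m - a).toNat
decreasing_by omega

-- summing a function that vanishes from m on: the range can stop at m
theorem pvTrimRight (a m : Int) (g : Int → Int) (hm : ∀ i, m ≤ i → g i = 0) (b : Int) :
    ((PySem.List.pyRange a b 1).map g).sum = ((PySem.List.pyRange a (min b m) 1).map g).sum := by
  by_cases h : b ≤ m
  · rw [min_eq_left h]
  · by_cases hb : b ≤ a
    · rw [PySem.List.pyRange_one_eq_nil hb, PySem.List.pyRange_one_eq_nil (by omega : min b m ≤ a)]
    · have key : PySem.List.pyRange a b 1 = PySem.List.pyRange a (b - 1) 1 ++ [b - 1] := by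
        have h2 := PySem.List.pyRange_one_succ_right (a := a) (b := b - 1) (by omega : a ≤ b - 1)
        rw [show b - 1 + 1 = b by ring] at h2
        exact h2
      rw [key]
      have ih := pvTrimRight a m g hm (b - 1)
      have hmin : min (b - 1) m = min b m := by omega
      simp only [List.map_append, List.sum_append, List.map_cons, List.map_nil, List.sum_cons,
        List.sum_nil, hm (b - 1) (by omega), add_zero]
      rw [ih, hmin]
termination_by (b - m).toNat
decreasing_by omega

-- a sum of a single-point function over a range
theorem pvSumPoint (a b t : Int) (h : Int → Int) :
    ((PySem.List.pyRange a b 1).map (fun i => if i = t then h i else 0)).sum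
      = if a ≤ t ∧ t < b then h t else 0 := by
  rw [pvTrimLeft b t _ (fun i hi => if_neg (by omega)) a,
      pvTrimRight (max a t) (t + 1) _ (fun i hi => if_neg (by omega)) b]
  by_cases hc : a ≤ t ∧ t < b
  · have h1 : max a t = t := by omega
    have h2 : min b (t + 1) = t + 1 := by omega
    rw [h1, h2, PySem.List.pyRange_one_singleton]
    simp [hc]
  · rw [PySem.List.pyRange_one_eq_nil (by omega : min b (t + 1) ≤ max a t)]
    simp [hc]

theorem pvSumMapSub (l : List Int) (f g : Int → Int) :
    (l.map (fun i => f i - g i)).sum = (l.map f).sum - (l.map g).sum := by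
  induction l with
  | nil => simp
  | cons i t ih => simp only [List.map_cons, List.sum_cons, ih]; ring

-- A equals the clamped rectangle sum minus the centre indicator
theorem pvAChar (d : List (List Int)) (x y dist : Int) :
    neighbour_roll_count d x y dist
      = ((PySem.List.pyRange (max 0 (y - dist)) (min ((d.length : Int) - 1) (y + dist) + 1) 1).map
          (fun ny => ((PySem.List.pyRange (max 0 (x - dist))
              (min (((PySem.List.pyGetD d 0 ([] : List Int)).length : Int) - 1) (x + dist) + 1) 1).map
            (pvInd d ny)).sum)).sum
        - (if (max 0 (y - dist) ≤ y ∧ y < min ((d.length : Int) - 1) (y + dist) + 1)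
             ∧ (max 0 (x - dist) ≤ x ∧
                x < min (((PySem.List.pyGetD d 0 ([] : List Int)).length : Int) - 1) (x + dist) + 1)
           then pvInd d y x else 0) := by
  simp only [neighbour_roll_count]
  set mY : Int := (d.length : Int) - 1 with hmY
  set mX : Int := ((PySem.List.pyGetD d 0 ([] : List Int)).length : Int) - 1 with hmX
  set rowS : Int → Int := fun ny =>
    ((PySem.List.pyRange (max 0 (x - dist)) (min mX (x + dist) + 1) 1).map (pvInd d ny)).sum with hrowS
  set gx : Int → Int → Int := fun ny nx =>
    if nx < 0 ∨ nx > mX then 0 else if nx = x ∧ ny = y then 0 else pvInd d ny nx with hgx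
  set gy : Int → Int := fun ny =>
    if ny < 0 ∨ ny > mY then 0
    else ((PySem.List.pyRange (x - dist) (x + dist + 1) 1).map (gx ny)).sum with hgy
  have hA1 : (PySem.List.pyRange (y - dist) (y + dist + 1) 1).foldl (fun cnt ny =>
      if ny < 0 ∨ ny > mY then cnt
      else (PySem.List.pyRange (x - dist) (x + dist + 1) 1).foldl (fun cnt nx =>
        if nx < 0 ∨ nx > mX then cnt
        else if nx = x ∧ ny = y then cnt
        else if PySem.List.pyGetD (PySem.List.pyGetD d ny ([] : List Int)) nx 0 ≠ 0 then cnt + 1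
        else cnt) cnt) 0
      = 0 + ((PySem.List.pyRange (y - dist) (y + dist + 1) 1).map gy).sum := by
    refine pvFoldlBodySum _ _ gy (fun ny _ c => ?_) 0
    by_cases h : ny < 0 ∨ ny > mY
    · simp [hgy, h]
    · rw [if_neg h, hgy]
      simp only [if_neg h]
      refine pvFoldlBodySum _ _ (gx ny) (fun nx _ c => ?_) c
      simp only [hgx, pvInd, pvIndR]
      split_ifs <;> omega
  have hA2 : ((PySem.List.pyRange (y - dist) (y + dist + 1) 1).map gy).sum
      = ((PySem.List.pyRange (max 0 (y - dist)) (min mY (y + dist) + 1) 1).map gy).sum := by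
    rw [pvTrimLeft (y + dist + 1) 0 gy (fun i hi => by rw [hgy]; exact if_pos (Or.inl hi)) (y - dist)]
    rw [pvTrimRight (max (y - dist) 0) (mY + 1) gy
      (fun i hi => by rw [hgy]; exact if_pos (Or.inr (by omega))) (y + dist + 1)]
    rw [max_comm (y - dist) 0, (by omega : min (y + dist + 1) (mY + 1) = min mY (y + dist) + 1)]
  have hA3 : ∀ ny ∈ PySem.List.pyRange (max 0 (y - dist)) (min mY (y + dist) + 1) 1,
      gy ny = rowS ny - (if max 0 (x - dist) ≤ x ∧ x < min mX (x + dist) + 1 then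
        (if ny = y then pvInd d ny x else 0) else 0) := by
    intro ny hny
    rw [PySem.List.mem_pyRange_one] at hny
    have h1 : gy ny = ((PySem.List.pyRange (x - dist) (x + dist + 1) 1).map (gx ny)).sum := by
      simp only [hgy]
      exact if_neg (by omega)
    rw [h1]
    rw [pvTrimLeft (x + dist + 1) 0 (gx ny) (fun i hi => by rw [hgx]; exact if_pos (Or.inl hi)) (x - dist)]
    rw [pvTrimRight (max (x - dist) 0) (mX + 1) (gx ny)
      (fun i hi => by rw [hgx]; exact if_pos (Or.inr (by omega))) (x + dist + 1)]
    rw [max_comm (x - dist) 0, (by omega : min (x + dist + 1) (mX + 1) = min mX (x + dist) + 1)]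
    rw [List.map_congr_left (g := fun nx =>
        pvInd d ny nx - (if nx = x then (if ny = y then pvInd d ny nx else 0) else 0))
      (fun nx hnx => by
        rw [PySem.List.mem_pyRange_one] at hnx
        simp only [hgx]
        rw [if_neg (by omega : ¬(nx < 0 ∨ nx > mX))]
        split_ifs <;> omega)]
    rw [pvSumMapSub, pvSumPoint _ _ x (fun nx => if ny = y then pvInd d ny nx else 0)]
  have hA4 : ((PySem.List.pyRange (max 0 (y - dist)) (min mY (y + dist) + 1) 1).map gy).sum
      = ((PySem.List.pyRange (max 0 (y - dist)) (min mY (y + dist) + 1) 1).map rowS).sum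
        - (if max 0 (y - dist) ≤ y ∧ y < min mY (y + dist) + 1 then
            (if max 0 (x - dist) ≤ x ∧ x < min mX (x + dist) + 1 then pvInd d y x else 0) else 0) := by
    rw [List.map_congr_left hA3, pvSumMapSub]
    congr 1
    rw [List.map_congr_left (g := fun ny => if ny = y then
        (if max 0 (x - dist) ≤ x ∧ x < min mX (x + dist) + 1 then pvInd d ny x else 0) else 0)
      (fun ny _ => by beta_reduce; split_ifs <;> omega)]
    exact pvSumPoint _ _ y (fun ny => if max 0 (x - dist) ≤ x ∧ x < min mX (x + dist) + 1 then pvInd d ny x else 0)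
  rw [hA1, hA2, hA4]
  have : (if (max 0 (y - dist) ≤ y ∧ y < min mY (y + dist) + 1)
             ∧ (max 0 (x - dist) ≤ x ∧ x < min mX (x + dist) + 1)
          then pvInd d y x else 0)
      = (if max 0 (y - dist) ≤ y ∧ y < min mY (y + dist) + 1 then
          (if max 0 (x - dist) ≤ x ∧ x < min mX (x + dist) + 1 then pvInd d y x else 0) else 0) := by
    split_ifs <;> first | rfl | omega
  rw [this]
  ring

-- the two ports agree on every input
theorem pvMain (d : List (List Int)) (x y dist : Int) :
    neighbour_roll_count d x y dist = neighbour_roll_count_alt d x y dist := by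
  rw [pvAChar]
  simp only [neighbour_roll_count_alt]
  set w : Int := ((PySem.List.pyGetD d 0 ([] : List Int)).length : Int) with hw
  set y0 : Int := max 0 (y - dist) with hy0
  set y1 : Int := min ((d.length : Int) - 1) (y + dist) with hy1
  set x0 : Int := max 0 (x - dist) with hx0
  set x1 : Int := min (w - 1) (x + dist) with hx1
  have hw0 : 0 ≤ w := by simp [hw]
  by_cases hempty : y0 > y1 ∨ x0 > x1
  · rw [if_pos hempty]
    rcases hempty with h | h
    · rw [PySem.List.pyRange_one_eq_nil (by omega : y1 + 1 ≤ y0)]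
      rw [if_neg (by omega : ¬((y0 ≤ y ∧ y < y1 + 1) ∧ (x0 ≤ x ∧ x < x1 + 1)))]
      simp
    · have hz : ∀ ny ∈ PySem.List.pyRange y0 (y1 + 1) 1,
          ((PySem.List.pyRange x0 (x1 + 1) 1).map (pvInd d ny)).sum = (0 : Int) := by
        intro ny _
        rw [PySem.List.pyRange_one_eq_nil (by omega : x1 + 1 ≤ x0)]
        simp
      rw [List.map_congr_left (g := fun _ => (0 : Int)) hz]
      rw [if_neg (by omega : ¬((y0 ≤ y ∧ y < y1 + 1) ∧ (x0 ≤ x ∧ x < x1 + 1)))]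
      simp
  · rw [if_neg hempty]
    have hyy : y0 ≤ y1 := by omega
    have hxx : x0 ≤ x1 := by omega
    -- the row queries equal the row sums
    have hq : ∀ ny ∈ PySem.List.pyRange y0 (y1 + 1) 1,
        PySem.List.pyGetD (PySem.List.pyGetD (d.map (fun row => pvRowPrefix row w)) ny ([] : List Int)) (x1 + 1) 0
        - PySem.List.pyGetD (PySem.List.pyGetD (d.map (fun row => pvRowPrefix row w)) ny ([] : List Int)) x0 0
        = ((PySem.List.pyRange x0 (x1 + 1) 1).map (pvInd d ny)).sum := by
      intro ny hny
      rw [PySem.List.mem_pyRange_one] at hny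
      have hnyR : 0 ≤ ny ∧ ny < (d.length : Int) := by
        constructor
        · omega
        · have : y1 ≤ (d.length : Int) - 1 := by simp [hy1]
          omega
      have hmap : PySem.List.pyGetD (d.map (fun row => pvRowPrefix row w)) ny ([] : List Int)
          = pvRowPrefix (PySem.List.pyGetD d ny ([] : List Int)) w := by
        rw [PySem.List.pyGetD_eq_getElem (d.map (fun row => pvRowPrefix row w)) ([] : List Int)
              hnyR.1 (by simpa using hnyR.2),
            PySem.List.pyGetD_eq_getElem d ([] : List Int) hnyR.1 hnyR.2]
        simp
      rw [hmap]
      exact pvPrefixQuery _ w x0 (x1 + 1) (by omega) (by omega) (by omega)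
    rw [List.map_congr_left hq]
    -- the centre corrections agree
    by_cases hc : (y0 ≤ y ∧ y < y1 + 1) ∧ (x0 ≤ x ∧ x < x1 + 1)
    · rw [if_pos hc]
      simp only [pvInd, pvIndR]
      by_cases h2 : PySem.List.pyGetD (PySem.List.pyGetD d y ([] : List Int)) x 0 ≠ 0
      · rw [if_pos h2, if_pos ⟨hc.1.1, by omega, hc.2.1, by omega, h2⟩]
      · rw [if_neg h2, if_neg (fun h => h2 h.2.2.2.2)]
        ring
    · rw [if_neg hc]
      rw [if_neg (by intro h; exact hc ⟨⟨h.1, by omega⟩, ⟨h.2.2.1, by omega⟩⟩)]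
      ring

-- ===== VERDICT (by name: the statement is the Claim_ definition above) =====
theorem neighbour_roll_count_spec : Claim_equal_neighbour_roll_count := by
  intro d x y dist _ _
  exact pvMain d x y dist
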